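-- pv_equiv track=rewrite | github.com/colgate-cs-research/tiramisu | prototype/nsdi.py | sign_combine
-- ===== SOURCE A (Python) =====
-- def sign_combine(label, sign):
--     newsign = sign.copy()
--     for k,v in label.items():
--         if k == 'cost' or k == 'len':
--             newsign[k] = v + (newsign[k] if k in newsign else 0)
--         elif k == 'lp':
--             newsign[k] = v
--
--     return newsign
-- ===== SOURCE B (Python) =====
-- def sign_combine(label, sign):
--     def newval(k, v):
--         if k in ('cost', 'len') and k in label:
--             return label.get(k, 0) + v
--         if k == 'lp' and 'lp' in label:
--             return label.get('lp', 0)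
--         return v
--     head = [(k, newval(k, v)) for k, v in sign.items()]
--     tail = [(k, v) for k, v in label.items() if k in ('cost', 'len', 'lp') and k not in sign]
--     return dict(head + tail)
-- ===== Notes on version B (the rewrite author's own statement) =====
-- stated objective: alternative
-- what changed: Replaces A's mutate-a-copy loop over label with a side-effect-free construction: map over sign's entries adjusting each value from label, then append label's relevant keys absent from sign.
import Mathlib
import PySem

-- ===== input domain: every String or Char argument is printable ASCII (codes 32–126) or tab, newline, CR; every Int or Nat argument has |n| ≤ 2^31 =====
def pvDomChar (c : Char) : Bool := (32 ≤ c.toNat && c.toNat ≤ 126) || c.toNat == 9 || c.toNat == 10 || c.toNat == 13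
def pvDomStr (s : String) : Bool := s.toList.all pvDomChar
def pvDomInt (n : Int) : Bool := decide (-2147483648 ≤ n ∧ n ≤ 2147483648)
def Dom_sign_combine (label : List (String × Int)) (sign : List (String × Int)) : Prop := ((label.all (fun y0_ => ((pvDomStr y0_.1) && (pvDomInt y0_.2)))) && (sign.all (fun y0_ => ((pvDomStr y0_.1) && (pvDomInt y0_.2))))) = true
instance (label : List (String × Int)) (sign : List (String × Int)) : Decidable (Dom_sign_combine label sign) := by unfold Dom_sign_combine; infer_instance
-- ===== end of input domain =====

-- B rebuilds the result without mutation (map over sign, then append label's fresh relevant keys); return value only, A copies its argument.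

-- ===== PORT A =====
-- one iteration of A's 'for k, v in label.items()' loop body on the dict newsign
def scStep (d : PySem.Dict String Int) (p : String × Int) : PySem.Dict String Int :=
  if p.1 == "cost" || p.1 == "len" then d.insert p.1 (p.2 + d.getD p.1 0)
  else if p.1 == "lp" then d.insert p.1 p.2
  else d

def sign_combine (label : List (String × Int)) (sign : List (String × Int)) : List (String × Int) :=
  (label.foldl scStep (PySem.Dict.mk sign)).items

-- ===== PORT B =====
-- Source B's helper newval(k, v), with ld = the dict label
def scNewval (ld : PySem.Dict String Int) (p : String × Int) : Int :=
  if (p.1 == "cost" || p.1 == "len") && ld.contains p.1 then ld.getD p.1 0 + p.2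
  else if p.1 == "lp" && ld.contains "lp" then ld.getD "lp" 0
  else p.2

def sign_combine_alt (label : List (String × Int)) (sign : List (String × Int)) : List (String × Int) :=
  let ld := PySem.Dict.mk label
  let sd := PySem.Dict.mk sign
  sign.map (fun p => (p.1, scNewval ld p))
    ++ label.filter (fun p => (p.1 == "cost" || p.1 == "len" || p.1 == "lp") && !(sd.contains p.1))

-- ===== PRECONDITION & SPEC =====
-- Both parameters are Python dicts; Pre_ restricts the association lists to canonical dict
-- representations (no duplicate keys) — a duplicate-key list does not denote a Python input.
def Pre_sign_combine (label : List (String × Int)) (sign : List (String × Int)) : Prop :=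
  (label.map Prod.fst).Nodup ∧ (sign.map Prod.fst).Nodup
instance (label : List (String × Int)) (sign : List (String × Int)) : Decidable (Pre_sign_combine label sign) := by unfold Pre_sign_combine; infer_instance

def pvWitness_sign_combine : (List (String × Int)) × (List (String × Int)) :=
  ([("cost", 2), ("lp", 7), ("x", 1)], [("len", 3), ("cost", 4)])

def Spec_sign_combine (label : List (String × Int)) (sign : List (String × Int)) (out : List (String × Int)) : Prop := out = sign_combine_alt label sign
instance (label : List (String × Int)) (sign : List (String × Int)) (out : List (String × Int)) : Decidable (Spec_sign_combine label sign out) := by unfold Spec_sign_combine; infer_instance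

-- ===== CLAIM (what is proved, stated in full; the proofs are below) =====
def Claim_equal_sign_combine : Prop := ∀ (label : List (String × Int)) (sign : List (String × Int)), Dom_sign_combine label sign → Pre_sign_combine label sign → Spec_sign_combine label sign (sign_combine label sign)

-- ===== LEMMAS AND PROOFS =====

lemma scNewval_cons_ne (p q : String × Int) (rest : List (String × Int)) (h : q.1 ≠ p.1) :
    scNewval (PySem.Dict.mk (p :: rest)) q = scNewval (PySem.Dict.mk rest) q := by
  obtain ⟨a, x⟩ := p
  obtain ⟨b, y⟩ := q
  simp only at h
  have hab : (a == b) = false := by simpa [beq_iff_eq] using fun hh => h hh.symm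
  have hc : (PySem.Dict.mk ((a, x) :: rest)).contains b = (PySem.Dict.mk rest).contains b := by
    simp [PySem.Dict.contains_mk, hab]
  have hg : (PySem.Dict.mk ((a, x) :: rest)).getD b 0 = (PySem.Dict.mk rest).getD b 0 := by
    simp [PySem.Dict.getD, PySem.Dict.get?_mk_cons, hab]
  by_cases hb : b = "lp"
  · subst hb; simp only [scNewval, hc, hg]
  · have hb' : (b == "lp") = false := by simpa [beq_iff_eq] using hb
    simp only [scNewval, hc, hg, hb', Bool.false_and]
    simp

lemma scNewval_cons_irrel (p q : String × Int) (rest : List (String × Int))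
    (h : (p.1 == "cost" || p.1 == "len" || p.1 == "lp") = false) :
    scNewval (PySem.Dict.mk (p :: rest)) q = scNewval (PySem.Dict.mk rest) q := by
  by_cases hq : q.1 = p.1
  · simp only [Bool.or_eq_false_iff] at h
    simp [scNewval, hq, h.1.1, h.1.2, h.2]
  · exact scNewval_cons_ne p q rest hq

-- value of scNewval at the head key
lemma scNewval_head (a : String) (y : Int) (rest : List (String × Int))
    (hrest : (PySem.Dict.mk rest).contains a = false) :
    scNewval (PySem.Dict.mk rest) (a, y) = y := by
  by_cases hlp : a = "lp"
  · subst hlp; simp [scNewval, hrest]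
  · have hlp' : (a == "lp") = false := by simpa [beq_iff_eq] using hlp
    simp [scNewval, hrest, hlp']

lemma sc_foldl_items (L : List (String × Int)) (d : PySem.Dict String Int)
    (hL : (L.map Prod.fst).Nodup) (hd : d.keys.Nodup) :
    (L.foldl scStep d).items
      = d.items.map (fun q => (q.1, scNewval (PySem.Dict.mk L) q))
        ++ L.filter (fun p => (p.1 == "cost" || p.1 == "len" || p.1 == "lp") && !(d.contains p.1)) := by
  induction L generalizing d with
  | nil =>
    simp [scNewval, PySem.Dict.contains_mk]
  | cons p rest ih =>
    obtain ⟨a, x⟩ := p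
    simp only [List.map_cons, List.nodup_cons, List.mem_map] at hL
    have hanotin : ∀ q ∈ rest, q.1 ≠ a := by
      intro q hq hqa; exact hL.1 ⟨q, hq, hqa⟩
    have hrest : (PySem.Dict.mk rest).contains a = false := by
      simp only [PySem.Dict.contains_mk, List.any_eq_false]
      intro q hq; simpa [beq_iff_eq] using hanotin q hq
    -- congruence for the filter over rest
    have hfilt : ∀ d' : PySem.Dict String Int,
        (∀ k, k ≠ a → d'.contains k = d.contains k) →
        rest.filter (fun p => (p.1 == "cost" || p.1 == "len" || p.1 == "lp") && !(d'.contains p.1))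
          = rest.filter (fun p => (p.1 == "cost" || p.1 == "len" || p.1 == "lp") && !(d.contains p.1)) := by
      intro d' hk
      apply List.filter_congr
      intro q hq
      rw [hk q.1 (hanotin q hq)]
    by_cases hrel : a = "cost" ∨ a = "len"
    · have hb : (a == "cost" || a == "len") = true := by
        rcases hrel with h | h <;> simp [h]
      have hlpne : a ≠ "lp" := by rcases hrel with h | h <;> simp [h]
      have hstep : scStep d (a, x) = d.insert a (x + d.getD a 0) := by simp [scStep, hb]
      rw [List.foldl_cons, hstep,
        ih _ hL.2 (PySem.Dict.nodup_keys_insert d a _ hd)]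
      have hcontains' : ∀ k, k ≠ a → (d.insert a (x + d.getD a 0)).contains k = d.contains k := by
        intro k hk
        rw [PySem.Dict.contains_insert]
        simp [beq_iff_eq, hk]
      rw [hfilt _ hcontains']
      by_cases hcd : d.contains a = true
      · -- key already present: in-place overwrite
        rw [PySem.Dict.items_insert_of_contains d _ hcd, List.map_map]
        rw [List.filter_cons_of_neg (by simp [hcd])]
        congr 1
        apply List.map_congr_left
        intro q hq
        by_cases hqa : q.1 = a
        · obtain ⟨k, w⟩ := q
          simp only at hqa; subst hqa
          have hw : d.getD k 0 = w := PySem.Dict.getD_of_mem_items d hq hd 0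
          have h1 : scNewval (PySem.Dict.mk ((k, x) :: rest)) (k, w) = x + w := by
            simp [scNewval, PySem.Dict.contains_mk, PySem.Dict.getD, PySem.Dict.get?_mk_cons, hb]
          simp [h1, hw, scNewval_head k (x + w) rest hrest]
        · have h0 : (q.1 == a) = false := by simpa [beq_iff_eq] using hqa
          have h2 := scNewval_cons_ne (a, x) q rest hqa
          simp [h2, hqa]
      · have hcd' : d.contains a = false := by simpa using hcd
        rw [PySem.Dict.items_insert_of_not_contains d _ hcd', List.map_append]
        rw [List.filter_cons_of_pos (by simp [hcd']; exact Or.inl hrel)]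
        have hnotin : ∀ q ∈ d.items, q.1 ≠ a := by
          intro q hq hqa
          have : d.contains a = true := by
            simp only [PySem.Dict.contains]
            exact List.any_eq_true.2 ⟨q, hq, by simp [hqa]⟩
          simp [this] at hcd'
        have hgd : d.getD a 0 = 0 := PySem.Dict.getD_of_not_contains d 0 hcd'
        rw [List.map_singleton, scNewval_head a (x + d.getD a 0) rest hrest, hgd, add_zero]
        rw [List.append_assoc]
        congr 1
        apply List.map_congr_left
        intro q hq
        rw [scNewval_cons_ne (a, x) q rest (hnotin q hq)]
    · by_cases hlp : a = "lp"
      · subst hlp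
        have hstep : scStep d ("lp", x) = d.insert "lp" x := by simp [scStep]
        rw [List.foldl_cons, hstep, ih _ hL.2 (PySem.Dict.nodup_keys_insert d _ _ hd)]
        have hcontains' : ∀ k, k ≠ "lp" → (d.insert "lp" x).contains k = d.contains k := by
          intro k hk; rw [PySem.Dict.contains_insert]; simp [beq_iff_eq, hk]
        rw [hfilt _ hcontains']
        by_cases hcd : d.contains "lp" = true
        · rw [PySem.Dict.items_insert_of_contains d _ hcd, List.map_map]
          rw [List.filter_cons_of_neg (by simp [hcd])]
          congr 1
          apply List.map_congr_left
          intro q hq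
          by_cases hqa : q.1 = "lp"
          · obtain ⟨k, w⟩ := q
            simp only at hqa; subst hqa
            have h1 : scNewval (PySem.Dict.mk (("lp", x) :: rest)) ("lp", w) = x := by
              simp [scNewval, PySem.Dict.contains_mk, PySem.Dict.getD, PySem.Dict.get?_mk_cons]
            simp [h1, scNewval_head "lp" x rest hrest]
          · have h0 : (q.1 == "lp") = false := by simpa [beq_iff_eq] using hqa
            have h2 := scNewval_cons_ne ("lp", x) q rest hqa
            simp [h2, hqa]
        · have hcd' : d.contains "lp" = false := by simpa using hcd
          rw [PySem.Dict.items_insert_of_not_contains d _ hcd', List.map_append]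
          rw [List.filter_cons_of_pos (by simp [hcd'])]  -- lp branch
          have hnotin : ∀ q ∈ d.items, q.1 ≠ "lp" := by
            intro q hq hqa
            have : d.contains "lp" = true := by
              simp only [PySem.Dict.contains]
              exact List.any_eq_true.2 ⟨q, hq, by simp [hqa]⟩
            simp [this] at hcd'
          rw [List.map_singleton, scNewval_head "lp" x rest hrest]
          rw [List.append_assoc]
          congr 1
          apply List.map_congr_left
          intro q hq
          rw [scNewval_cons_ne ("lp", x) q rest (hnotin q hq)]
      · obtain ⟨ha1, ha2⟩ := not_or.mp hrel
        have hirr : (a == "cost" || a == "len" || a == "lp") = false := by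
          simp [ha1, ha2, hlp]
        have hstep : scStep d (a, x) = d := by
          simp only [Bool.or_assoc] at hirr
          simp only [Bool.or_eq_false_iff] at hirr
          simp [scStep, hirr.1, hirr.2.1, hirr.2.2]
        rw [List.foldl_cons, hstep, ih _ hL.2 hd]
        rw [List.filter_cons_of_neg (by simp only [hirr]; simp)]
        congr 1
        apply List.map_congr_left
        intro q hq
        rw [scNewval_cons_irrel (a, x) q rest (by simpa using hirr)]

-- ===== VERDICT (by name: the statement is the Claim_ definition above) =====
theorem sign_combine_spec : Claim_equal_sign_combine := by
  intro label sign _ hpre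
  unfold Spec_sign_combine sign_combine sign_combine_alt
  have hd : (PySem.Dict.mk sign).keys.Nodup := by
    simpa [PySem.Dict.keys_mk] using hpre.2
  simpa using sc_foldl_items label (PySem.Dict.mk sign) hpre.1 hd
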